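-- pv_equiv track=rewrite | github.com/matt-seb-ho/arc_memo | concept_mem/utils/puzzle_utils.py | remove_barc_concepts_from_solution
-- ===== SOURCE A (Python) =====
-- def remove_barc_concepts_from_solution(solution: str) -> str:
--     # we want to remove the "# concepts:" line and the line after it
--     lines = solution.split("\n")
--     new_lines = []
--     skip_next = False
--     for line in lines:
--         if skip_next:
--             skip_next = False
--             continue
--         if line.startswith("# concepts:"):
--             skip_next = True
--             continue
--         new_lines.append(line)
--     return "\n".join(new_lines)
-- ===== SOURCE B (Python) =====
-- def remove_barc_concepts_from_solution(solution: str) -> str: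
--     # structural recursion over the line list: drop a "# concepts:" line together
--     # with the line after it, keep everything else
--     def go(ls):
--         if not ls:
--             return []
--         if ls[0].startswith("# concepts:"):
--             return go(ls[2:])
--         return [ls[0]] + go(ls[1:])
--     return "\n".join(go(solution.split("\n")))
-- ===== Notes on version B (the rewrite author's own statement) =====
-- stated objective: simpler
-- what changed: Replaces A's skip_next-flag accumulator loop with a direct structural recursion over the line list that drops a '# concepts:' line together with its successor in one step.
import Mathlib
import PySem

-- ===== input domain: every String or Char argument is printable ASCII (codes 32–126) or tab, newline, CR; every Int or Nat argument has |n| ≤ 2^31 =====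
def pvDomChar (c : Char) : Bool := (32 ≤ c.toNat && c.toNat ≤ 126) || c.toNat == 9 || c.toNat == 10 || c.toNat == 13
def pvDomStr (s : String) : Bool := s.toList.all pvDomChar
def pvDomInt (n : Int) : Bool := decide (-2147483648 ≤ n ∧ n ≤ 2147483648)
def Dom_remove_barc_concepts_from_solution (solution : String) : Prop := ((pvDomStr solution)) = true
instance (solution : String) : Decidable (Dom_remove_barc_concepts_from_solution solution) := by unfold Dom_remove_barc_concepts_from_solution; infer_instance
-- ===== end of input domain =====

-- B replaces A's skip-flag accumulator loop by a structural recursion over the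
-- line list that drops a "# concepts:" line together with its successor (simpler).

-- ===== PORT A =====
-- literal transliteration of A's flag loop: state = (new_lines, skip_next)
def remove_barc_concepts_from_solution (solution : String) : String :=
  let lines := (PySem.Str.split? solution "\n").getD []   -- sep ≠ "", so split? is some
  let st := lines.foldl (fun (st : List String × Bool) line =>
      if st.2 then (st.1, false)
      else if PySem.Str.startswith line "# concepts:" then (st.1, true)
      else (st.1 ++ [line], st.2)) ([], false)
  PySem.Str.join "\n" st.1

-- ===== PORT B =====
-- B's helper go: structural recursion on the line list
def pvGoB : List String → List String
  | [] => []
  | l :: rest =>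
    if PySem.Str.startswith l "# concepts:" then pvGoB (rest.drop 1)
    else l :: pvGoB rest
termination_by ls => ls.length
decreasing_by
  · simp only [List.length_cons]; have := List.length_drop (l := rest) (i := 1); omega
  · simp

def remove_barc_concepts_from_solution_alt (solution : String) : String :=
  PySem.Str.join "\n" (pvGoB ((PySem.Str.split? solution "\n").getD []))

-- ===== PRECONDITION & SPEC =====
def Spec_remove_barc_concepts_from_solution (solution : String) (out : String) : Prop := out = remove_barc_concepts_from_solution_alt solution
instance (solution : String) (out : String) : Decidable (Spec_remove_barc_concepts_from_solution solution out) := by unfold Spec_remove_barc_concepts_from_solution; infer_instance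

-- ===== CLAIM (what is proved, stated in full; the proofs are below) =====
def Claim_equal_remove_barc_concepts_from_solution : Prop := ∀ (solution : String), Dom_remove_barc_concepts_from_solution solution → Spec_remove_barc_concepts_from_solution solution (remove_barc_concepts_from_solution solution)

-- ===== LEMMAS AND PROOFS =====

-- A's fold from skip=false accumulates exactly acc ++ pvGoB ls
theorem pv_fold_eq_goB (ls : List String) (acc : List String) :
    (ls.foldl (fun (st : List String × Bool) line =>
      if st.2 then (st.1, false)
      else if PySem.Str.startswith line "# concepts:" then (st.1, true)
      else (st.1 ++ [line], st.2)) (acc, false)).1 = acc ++ pvGoB ls := by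
  induction ls using pvGoB.induct generalizing acc with
  | case1 => simp [pvGoB]
  | case2 l rest h ih =>
    rw [pvGoB]
    simp only [List.foldl_cons, h, if_true]
    cases rest with
    | nil => simp [pvGoB]
    | cons x rest' =>
      simp only [List.foldl_cons, List.drop_succ_cons, List.drop_zero] at *
      exact ih acc
  | case3 l rest h ih =>
    rw [pvGoB]
    simp only [List.foldl_cons, h, if_false, Bool.false_eq_true]
    rw [ih (acc ++ [l])]
    simp

-- ===== VERDICT (by name: the statement is the Claim_ definition above) =====
theorem remove_barc_concepts_from_solution_spec : Claim_equal_remove_barc_concepts_from_solution := by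
  intro solution _
  show _ = _
  unfold remove_barc_concepts_from_solution remove_barc_concepts_from_solution_alt
  dsimp only
  rw [pv_fold_eq_goB]
  simp
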